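-- pv_equiv track=rewrite | github.com/Enjef/Algo | 2200 - 2299/2221 - Find Triangular Sum of an Array/2221 - Find Triangular Sum of an Array.py | triangularSum_best_speed
-- ===== SOURCE A (Python) =====
-- from typing import List
--
-- def triangularSum_best_speed(nums: List[int]) -> int:
--     result = 0
--     n = len(nums)
--     mCk = 1
--     for k, num in enumerate(nums, 1):
--         result += mCk % 10 * num
--         mCk = mCk * (n - k) // k
--     return result % 10
-- ===== SOURCE B (Python) =====
-- from typing import List
--
-- def triangularSum_best_speed(nums: List[int]) -> int:
--     if not nums:
--         return 0
--     cur = list(nums)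
--     while len(cur) > 1:
--         cur = [(cur[i] + cur[i + 1]) % 10 for i in range(len(cur) - 1)]
--     return cur[0] % 10
-- ===== Notes on version B (the rewrite author's own statement) =====
-- stated objective: alternative
-- what changed: B performs the literal triangular reduction (repeatedly replacing the list by adjacent sums mod 10) instead of A's one-pass binomial-coefficient weighted sum.
import Mathlib
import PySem

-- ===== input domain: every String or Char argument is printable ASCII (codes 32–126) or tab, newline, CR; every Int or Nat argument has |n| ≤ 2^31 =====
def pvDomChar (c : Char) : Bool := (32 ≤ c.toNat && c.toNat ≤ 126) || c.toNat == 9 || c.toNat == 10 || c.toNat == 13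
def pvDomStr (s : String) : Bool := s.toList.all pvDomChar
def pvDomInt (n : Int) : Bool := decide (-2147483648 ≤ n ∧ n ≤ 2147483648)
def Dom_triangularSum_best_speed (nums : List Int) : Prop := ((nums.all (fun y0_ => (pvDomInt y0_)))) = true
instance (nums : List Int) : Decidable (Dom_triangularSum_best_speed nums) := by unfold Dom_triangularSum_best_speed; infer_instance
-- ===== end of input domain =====

-- B replaces A's one-pass binomial-coefficient weighted sum by the direct triangular
-- reduction (repeatedly replace the list by adjacent sums mod 10); same result, alternative algorithm.

-- ===== PORT A =====
def triangularSum_best_speed (nums : List Int) : Int :=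
  PySem.Int.mod
    ((PySem.List.enumerate nums 1).foldl
      (fun (st : Int × Int) kv =>
        (st.1 + PySem.Int.mod st.2 10 * kv.2,
         PySem.Int.floordiv (st.2 * ((nums.length : Int) - kv.1)) kv.1))
      ((0 : Int), (1 : Int))).1 10

-- ===== PORT B =====
-- one round: [(cur[i] + cur[i+1]) % 10 for i in range(len(cur) - 1)], as adjacent-pair recursion
def triStep : List Int → List Int
  | [] => []
  | [_] => []
  | a :: b :: rest => PySem.Int.mod (a + b) 10 :: triStep (b :: rest)

-- needed by triLoop's termination proof
theorem triStep_length (l : List Int) : (triStep l).length = l.length - 1 := by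
  induction l with
  | nil => simp [triStep]
  | cons a t ih =>
    cases t with
    | nil => simp [triStep]
    | cons b r =>
      simp only [triStep, List.length_cons] at ih ⊢
      omega

-- the while loop: shrink until at most one element is left
def triLoop (cur : List Int) : List Int :=
  if 1 < cur.length then triLoop (triStep cur) else cur
termination_by cur.length
decreasing_by rw [triStep_length]; omega

def triangularSum_best_speed_alt (nums : List Int) : Int :=
  match nums with
  | [] => 0
  | _ :: _ => PySem.Int.mod ((triLoop nums).headD 0) 10

-- ===== PRECONDITION & SPEC =====
def Spec_triangularSum_best_speed (nums : List Int) (out : Int) : Prop := out = triangularSum_best_speed_alt nums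
instance (nums : List Int) (out : Int) : Decidable (Spec_triangularSum_best_speed nums out) := by unfold Spec_triangularSum_best_speed; infer_instance

-- ===== CLAIM (what is proved, stated in full; the proofs are below) =====
def Claim_equal_triangularSum_best_speed : Prop := ∀ (nums : List Int), Dom_triangularSum_best_speed nums → Spec_triangularSum_best_speed nums (triangularSum_best_speed nums)

-- ===== LEMMAS AND PROOFS =====

-- the exact binomial-weighted sum both programs compute mod 10
def binomSum (m : Nat) (l : List Int) : Int :=
  ∑ i ∈ Finset.range l.length, ((m.choose i : Int) * l.getD i 0)

theorem pymod_ten (a : Int) : PySem.Int.mod a 10 = a % 10 :=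
  PySem.Int.mod_eq_emod_of_pos (by norm_num)

theorem mul_emod_ten_right (c x : Int) : (c * (x % 10)) % 10 = (c * x) % 10 := by
  rw [Int.mul_emod c (x % 10), Int.emod_emod_of_dvd _ dvd_rfl, ← Int.mul_emod]

theorem mul_emod_ten_left (c x : Int) : ((c % 10) * x) % 10 = (c * x) % 10 := by
  rw [Int.mul_emod (c % 10) x, Int.emod_emod_of_dvd _ dvd_rfl, ← Int.mul_emod]

theorem sum_emod_ten_congr (s : Finset ℕ) (f g : ℕ → Int)
    (h : ∀ i ∈ s, f i % 10 = g i % 10) :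
    (∑ i ∈ s, f i) % 10 = (∑ i ∈ s, g i) % 10 := by
  rw [Finset.sum_int_mod s 10 f, Finset.sum_int_mod s 10 g, Finset.sum_congr rfl h]

-- Pascal's rule, summed
theorem pascal_sum (m : Nat) (f : ℕ → Int) :
    ∑ i ∈ Finset.range (m + 2), ((m + 1).choose i : Int) * f i
      = ∑ i ∈ Finset.range (m + 1), ((m.choose i : Int)) * (f i + f (i + 1)) := by
  have h1 : ∑ i ∈ Finset.range (m + 1), ((m.choose (i + 1) : Int)) * f (i + 1)
      = ∑ i ∈ Finset.range m, ((m.choose (i + 1) : Int)) * f (i + 1) := by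
    rw [Finset.sum_range_succ]; simp
  rw [Finset.sum_range_succ' (fun i => ((m + 1).choose i : Int) * f i) (m + 1)]
  simp only [Nat.choose_succ_succ, Nat.cast_add, add_mul, Nat.choose_zero_right,
    Nat.cast_one, one_mul]
  rw [Finset.sum_add_distrib, h1]
  simp only [mul_add]
  rw [Finset.sum_add_distrib,
    Finset.sum_range_succ' (fun i => ((m.choose i : Int)) * f i) m]
  simp only [Nat.choose_zero_right, Nat.cast_one, one_mul]
  ring

theorem triStep_getD (l : List Int) : ∀ (i : Nat), i + 1 < l.length →
    (triStep l).getD i 0 = PySem.Int.mod (l.getD i 0 + l.getD (i + 1) 0) 10 := by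
  induction l with
  | nil => intro i h; simp at h
  | cons a t ih =>
    cases t with
    | nil => intro i h; simp at h
    | cons b r =>
      intro i h
      cases i with
      | zero => simp [triStep]
      | succ i' =>
        simp only [triStep, List.getD_cons_succ]
        exact ih i' (by simp at h ⊢; omega)

theorem binomSum_triStep (l : List Int) (m : Nat) (hm : l.length = m + 2) :
    binomSum m (triStep l) % 10 = binomSum (m + 1) l % 10 := by
  unfold binomSum
  rw [triStep_length, hm]
  have h2 : (∑ i ∈ Finset.range (m + 1), ((m.choose i : Int) * (triStep l).getD i 0)) % 10
      = (∑ i ∈ Finset.range (m + 1), ((m.choose i : Int) * (l.getD i 0 + l.getD (i + 1) 0))) % 10 := by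
    apply sum_emod_ten_congr
    intro i hi
    rw [triStep_getD l i (by simp only [Finset.mem_range] at hi; omega), pymod_ten,
      mul_emod_ten_right]
  rw [pascal_sum m (fun i => l.getD i 0)]
  exact h2

theorem triLoop_spec : ∀ (k : Nat) (l : List Int), l.length = k + 1 →
    ((triLoop l).headD 0) % 10 = binomSum k l % 10 := by
  intro k
  induction k with
  | zero =>
    intro l hl
    obtain ⟨a, rfl⟩ := List.length_eq_one_iff.mp hl
    rw [triLoop]
    simp [binomSum]
  | succ k ih =>
    intro l hl
    rw [triLoop, if_pos (by omega)]
    rw [ih (triStep l) (by rw [triStep_length]; omega)]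
    exact binomSum_triStep l k (by omega)

theorem foldA (n : Nat) : ∀ (l : List Int) (j : Nat) (r : Int), j + l.length = n →
    ((PySem.List.enumerate l ((j : Int) + 1)).foldl
      (fun (st : Int × Int) kv =>
        (st.1 + PySem.Int.mod st.2 10 * kv.2,
         PySem.Int.floordiv (st.2 * ((n : Int) - kv.1)) kv.1))
      (r, ((n - 1).choose j : Int))).1
    = r + ∑ i ∈ Finset.range l.length,
        PySem.Int.mod ((n - 1).choose (j + i) : Int) 10 * l.getD i 0 := by
  intro l
  induction l with
  | nil => intro j r h; simp [PySem.List.enumerate_nil]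
  | cons a t ih =>
    intro j r h
    rw [PySem.List.enumerate_cons, List.foldl_cons]
    have hj : j + 1 ≤ n := by simp only [List.length_cons] at h; omega
    have hc : PySem.Int.floordiv (((n - 1).choose j : Int) * ((n : Int) - ((j : Int) + 1))) ((j : Int) + 1)
        = ((n - 1).choose (j + 1) : Int) := by
      have hcast : ((n : Int) - ((j : Int) + 1)) = (((n - 1) - j : Nat) : Int) := by
        push_cast [Nat.cast_sub (show 1 ≤ n by omega), Nat.cast_sub (show j ≤ n - 1 by omega)]
        omega
      rw [hcast,
        show (((n - 1).choose j : Int)) * ((((n - 1) - j : Nat)) : Int)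
          = (((n - 1).choose j * ((n - 1) - j) : Nat) : Int) by push_cast; ring,
        ← Nat.choose_succ_right_eq,
        show ((j : Int) + 1) = (((j + 1 : Nat)) : Int) by push_cast; ring,
        PySem.Int.floordiv_natCast]
      rw [Nat.mul_div_cancel _ (by omega : 0 < j + 1)]
    have hstart : ((j : Int) + 1) + 1 = (((j + 1 : Nat) : Int)) + 1 := by push_cast; ring
    rw [hc, hstart, ih (j + 1) (r + PySem.Int.mod ((n - 1).choose j : Int) 10 * a)
      (by simp only [List.length_cons] at h; omega)]
    rw [List.length_cons,
      Finset.sum_range_succ' (fun i => PySem.Int.mod ((n - 1).choose (j + i) : Int) 10 * (a :: t).getD i 0) t.length]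
    simp only [List.getD_cons_succ, List.getD_cons_zero, Nat.add_zero]
    have : ∀ i, j + 1 + i = j + (i + 1) := by omega
    simp only [this]
    ring

theorem A_eq_binomSum (nums : List Int) :
    triangularSum_best_speed nums = binomSum (nums.length - 1) nums % 10 := by
  unfold triangularSum_best_speed
  have h0 : (1 : Int) = ((0 : Nat) : Int) + 1 := by norm_num
  have h1 : (1 : Int) = (((nums.length - 1).choose 0 : Nat) : Int) := by simp
  rw [show ((PySem.List.enumerate nums 1)) = (PySem.List.enumerate nums (((0 : Nat) : Int) + 1)) by norm_num]
  rw [show ((0 : Int), (1 : Int)) = ((0 : Int), (((nums.length - 1).choose 0 : Nat) : Int)) by simp]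
  rw [foldA nums.length nums 0 0 (by omega)]
  rw [pymod_ten]
  simp only [zero_add]
  unfold binomSum
  apply sum_emod_ten_congr
  intro i hi
  rw [pymod_ten]
  exact mul_emod_ten_left _ _

-- ===== VERDICT (by name: the statement is the Claim_ definition above) =====
theorem triangularSum_best_speed_spec : Claim_equal_triangularSum_best_speed := by
  intro nums _
  unfold Spec_triangularSum_best_speed
  rw [A_eq_binomSum]
  cases nums with
  | nil => simp [triangularSum_best_speed_alt, binomSum]
  | cons a t =>
    unfold triangularSum_best_speed_alt
    rw [pymod_ten, triLoop_spec t.length (a :: t) (by simp)]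
    simp
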